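-- pv_equiv track=rewrite | github.com/whitedevil-cmd/DSA | find_ranks_package/find_ranks/find_ranks.py | find_ranks
-- ===== SOURCE A (Python) =====
-- def find_ranks(score):
--     sorted_scores = sorted(score, reverse=True)
--     rank_map = {}
--     for i, val in enumerate(sorted_scores):
--         if i == 0:
--             rank_map[val] = "Gold Medal"
--         elif i == 1:
--             rank_map[val] = "Silver Medal"
--         elif i == 2:
--             rank_map[val] = "Bronze Medal"
--         else:
--             rank_map[val] = str(i + 1)
--     result = [rank_map[s] for s in score]
--     return result
-- ===== SOURCE B (Python) =====
-- def find_ranks(score):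
--     counts = {}
--     for x in score:
--         counts[x] = counts.get(x, 0) + 1
--     ge = {}
--     running = 0
--     for v in sorted(counts, reverse=True):
--         running += counts[v]
--         ge[v] = running
--
--     def label(i):
--         if i == 0:
--             return "Gold Medal"
--         if i == 1:
--             return "Silver Medal"
--         if i == 2:
--             return "Bronze Medal"
--         return str(i + 1)
--
--     return [label(ge[s] - 1) for s in score]
-- ===== Notes on version B (the rewrite author's own statement) =====
-- stated objective: alternative
-- what changed: Replaces the enumerate-the-sorted-list-and-overwrite rank dict with a value counter plus a running suffix-sum over the distinct values in descending order: each score's rank index is (number of elements >= it) - 1, which coincides with A's last-duplicate-wins dict entry.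
import Mathlib
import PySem

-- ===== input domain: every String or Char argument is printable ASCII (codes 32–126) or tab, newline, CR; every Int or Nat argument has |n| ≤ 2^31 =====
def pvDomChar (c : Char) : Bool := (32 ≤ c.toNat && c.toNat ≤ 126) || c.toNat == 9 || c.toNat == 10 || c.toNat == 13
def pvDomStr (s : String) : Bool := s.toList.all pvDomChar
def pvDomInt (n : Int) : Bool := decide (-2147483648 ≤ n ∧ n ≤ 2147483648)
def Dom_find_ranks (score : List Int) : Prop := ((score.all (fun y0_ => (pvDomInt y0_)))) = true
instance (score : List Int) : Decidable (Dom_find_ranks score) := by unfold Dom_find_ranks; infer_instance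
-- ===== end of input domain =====

-- B replaces A's enumerate-the-sorted-list-and-overwrite rank dict with a value counter
-- plus a running suffix-sum over the distinct values in descending order (alternative
-- decomposition; same value, not claimed faster).

-- ===== PORT A =====
-- rank_map[s] in the final comprehension: the key is always present (s was inserted
-- from the sorted permutation), so getD with a dummy default "" is exact here.
def find_ranks (score : List Int) : List String :=
  let sorted_scores := PySem.List.sorted score (fun x => x) true
  let rank_map :=
    (PySem.List.enumerate sorted_scores).foldl
      (fun d p =>
        if p.1 = 0 then d.insert p.2 "Gold Medal"
        else if p.1 = 1 then d.insert p.2 "Silver Medal"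
        else if p.1 = 2 then d.insert p.2 "Bronze Medal"
        else d.insert p.2 (PySem.Int.toStr (p.1 + 1)))
      PySem.Dict.empty
  score.map (fun s => rank_map.getD s "")

-- ===== PORT B =====
def pvLabel (i : Int) : String :=
  if i = 0 then "Gold Medal"
  else if i = 1 then "Silver Medal"
  else if i = 2 then "Bronze Medal"
  else PySem.Int.toStr (i + 1)

-- ge[s] in the final comprehension: the key is always present (every score is a key of
-- counts), so getD with a dummy default 0 is exact here; same for counts[v].
def pvGeMap (score : List Int) : PySem.Dict Int Int :=
  let counts := score.foldl (fun d x => d.insert x (d.getD x 0 + 1)) PySem.Dict.empty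
  ((PySem.List.sorted counts.keys (fun x => x) true).foldl
      (fun st v => (st.1 + counts.getD v 0, st.2.insert v (st.1 + counts.getD v 0)))
      ((0 : Int), (PySem.Dict.empty : PySem.Dict Int Int))).2

def find_ranks_alt (score : List Int) : List String :=
  score.map (fun s => pvLabel ((pvGeMap score).getD s 0 - 1))

-- ===== PRECONDITION & SPEC =====
def Spec_find_ranks (score : List Int) (out : List String) : Prop := out = find_ranks_alt score
instance (score : List Int) (out : List String) : Decidable (Spec_find_ranks score out) := by unfold Spec_find_ranks; infer_instance

-- ===== CLAIM (what is proved, stated in full; the proofs are below) =====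
def Claim_equal_find_ranks : Prop := ∀ (score : List Int), Dom_find_ranks score → Spec_find_ranks score (find_ranks score)

-- ===== LEMMAS AND PROOFS =====

-- A's loop body is insert of pvLabel
theorem pv_body_eq (d : PySem.Dict Int String) (p : Int × Int) :
    (if p.1 = 0 then d.insert p.2 "Gold Medal"
     else if p.1 = 1 then d.insert p.2 "Silver Medal"
     else if p.1 = 2 then d.insert p.2 "Bronze Medal"
     else d.insert p.2 (PySem.Int.toStr (p.1 + 1)))
      = d.insert p.2 (pvLabel p.1) := by
  unfold pvLabel; split_ifs <;> rfl

-- inserts at other keys do not change the lookup (A's label fold)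
theorem pv_getD_foldl_not_mem (l : List (Int × Int)) (d : PySem.Dict Int String) (v : Int)
    (h : ∀ p ∈ l, p.2 ≠ v) :
    (l.foldl (fun d p => d.insert p.2 (pvLabel p.1)) d).getD v "" = d.getD v "" := by
  induction l generalizing d with
  | nil => rfl
  | cons a t ih =>
      simp only [List.foldl_cons]
      rw [ih _ (fun p hp => h p (List.mem_cons_of_mem _ hp)), PySem.Dict.getD_insert]
      simp [Ne.symm (h a List.mem_cons_self)]

-- A-side core invariant: on a descending-sorted list, the last-wins dict entry for v is
-- the label at index (count of elements ≥ v) - 1 (offset by the enumeration start)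
theorem pv_lookup (ss : List Int) :
    ∀ (off : Int) (d : PySem.Dict Int String) (v : Int),
      ss.Pairwise (fun a b => b ≤ a) → v ∈ ss →
      ((PySem.List.enumerate ss off).foldl (fun d p => d.insert p.2 (pvLabel p.1)) d).getD v ""
        = pvLabel (off + (ss.countP (fun x => decide (v ≤ x)) : Int) - 1) := by
  induction ss with
  | nil => intro _ _ _ _ hv; cases hv
  | cons a t ih =>
      intro off d v hp hv
      have hpa : ∀ b ∈ t, b ≤ a := (List.pairwise_cons.mp hp).1
      have hpt : t.Pairwise (fun a b => b ≤ a) := (List.pairwise_cons.mp hp).2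
      rw [PySem.List.enumerate_cons]
      simp only [List.foldl_cons]
      by_cases hvt : v ∈ t
      · have hva : v ≤ a := hpa v hvt
        rw [ih (off + 1) _ v hpt hvt]
        have : (a :: t).countP (fun x => decide (v ≤ x))
             = t.countP (fun x => decide (v ≤ x)) + 1 := by
          simp [hva]
        rw [this]; congr 1; push_cast; ring
      · have hva : v = a := by cases hv with
          | head => rfl
          | tail _ h => exact absurd h hvt
        subst hva
        rw [pv_getD_foldl_not_mem _ _ v (by
          intro p hp hpe
          rcases (PySem.List.mem_enumerate_iff _ _ _).mp hp with ⟨k, hk, rfl⟩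
          exact hvt (hpe ▸ List.getElem_mem hk))]
        rw [PySem.Dict.getD_insert_self]
        have hct : t.countP (fun x => decide (v ≤ x)) = 0 := by
          rw [List.countP_eq_zero]
          intro x hx hle
          exact hvt (le_antisymm (hpa x hx) (of_decide_eq_true hle) ▸ hx)
        have : (v :: t).countP (fun x => decide (v ≤ x)) = 1 := by
          simp [hct]
        rw [this]; congr 1; push_cast; ring

-- inserts at other keys do not change the lookup (B's suffix-sum fold)
theorem pv_getD_foldl_not_mem' (c : Int → Int) (l : List Int) :
    ∀ (st : Int × PySem.Dict Int Int) (v : Int), (∀ u ∈ l, u ≠ v) →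
      (l.foldl (fun st u => (st.1 + c u, st.2.insert u (st.1 + c u))) st).2.getD v 0
        = st.2.getD v 0 := by
  induction l with
  | nil => intro _ _ _; rfl
  | cons a t ih =>
      intro st v h
      simp only [List.foldl_cons]
      rw [ih _ v (fun u hu => h u (List.mem_cons_of_mem _ hu)), PySem.Dict.getD_insert]
      simp [Ne.symm (h a List.mem_cons_self)]

-- B-side core invariant: over strictly descending distinct values, the running suffix
-- sum recorded for v is r plus the total weight of values ≥ v
theorem pv_suffix (c : Int → Int) (vs : List Int) :
    ∀ (r : Int) (d : PySem.Dict Int Int) (v : Int),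
      vs.Pairwise (fun a b => b < a) → v ∈ vs →
      ((vs.foldl (fun st u => (st.1 + c u, st.2.insert u (st.1 + c u))) (r, d)).2).getD v 0
        = r + ((vs.filter (fun u => decide (v ≤ u))).map c).sum := by
  induction vs with
  | nil => intro _ _ _ _ hv; cases hv
  | cons a t ih =>
      intro r d v hp hv
      have hpa : ∀ b ∈ t, b < a := (List.pairwise_cons.mp hp).1
      have hpt : t.Pairwise (fun a b => b < a) := (List.pairwise_cons.mp hp).2
      simp only [List.foldl_cons]
      by_cases hvt : v ∈ t
      · have hva : v ≤ a := le_of_lt (hpa v hvt)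
        rw [ih _ _ v hpt hvt]
        simp [hva]
        ring
      · have hva : v = a := by cases hv with
          | head => rfl
          | tail _ h => exact absurd h hvt
        subst hva
        rw [pv_getD_foldl_not_mem' c t _ v (fun u hu he => absurd (he ▸ hu) hvt),
            PySem.Dict.getD_insert_self]
        have hft : t.filter (fun u => decide (v ≤ u)) = [] := by
          rw [List.filter_eq_nil_iff]
          intro u hu hle
          exact absurd ((le_antisymm (le_of_lt (hpa u hu)) (of_decide_eq_true hle)) ▸ hu) hvt
        simp [hft]

-- if x is not among vs the 0/1 indicator sums to 0
theorem pv_indicator_zero (p : Int → Bool) (x : Int) (vs : List Int) (hx : x ∉ vs) :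
    (((vs.filter p).map (fun u => if x = u then (1 : Int) else 0)).sum) = 0 := by
  induction vs with
  | nil => rfl
  | cons a t ih =>
      have hxa : x ≠ a := fun h => hx (h ▸ List.mem_cons_self)
      have hxt : x ∉ t := fun h => hx (List.mem_cons_of_mem _ h)
      rw [List.filter_cons]
      by_cases hpa : p a = true <;> simp [hpa, hxa, ih hxt]

-- on distinct vs containing x, the 0/1 indicator over the p-filtered list sums to [p x]
theorem pv_indicator (p : Int → Bool) (x : Int) (vs : List Int)
    (hnd : vs.Nodup) (hx : x ∈ vs) :
    (((vs.filter p).map (fun u => if x = u then (1 : Int) else 0)).sum)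
      = if p x then 1 else 0 := by
  induction vs with
  | nil => cases hx
  | cons a t ih =>
      have hat : a ∉ t := (List.nodup_cons.mp hnd).1
      have hndt : t.Nodup := (List.nodup_cons.mp hnd).2
      rw [List.filter_cons]
      by_cases hxa : x = a
      · subst hxa
        by_cases hpx : p x = true <;>
          simp [hpx, pv_indicator_zero p x t hat]
      · have hxt : x ∈ t := by cases hx with
          | head => exact absurd rfl hxa
          | tail _ h => exact h
        by_cases hpa : p a = true <;> simp [hpa, hxa, ih hndt hxt]

-- counting via distinct values: the weighted sum over the p-filtered distinct values
-- equals countP p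
theorem pv_count_sum (p : Int → Bool) (l : List Int) :
    ∀ (vs : List Int), vs.Nodup → (∀ x ∈ l, x ∈ vs) →
      (((vs.filter p).map (fun u => (l.count u : Int))).sum) = (l.countP p : Int) := by
  induction l with
  | nil => intro vs _ _; simp
  | cons x l ih =>
      intro vs hnd hmem
      have hx : x ∈ vs := hmem x List.mem_cons_self
      have hml : ∀ y ∈ l, y ∈ vs := fun y hy => hmem y (List.mem_cons_of_mem _ hy)
      have hsplit : ∀ u : Int, ((x :: l).count u : Int)
          = (l.count u : Int) + (if x = u then (1 : Int) else 0) := by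
        intro u
        by_cases h : x = u <;> simp [h]
      calc ((vs.filter p).map (fun u => ((x :: l).count u : Int))).sum
          = ((vs.filter p).map (fun u =>
              (l.count u : Int) + (if x = u then (1 : Int) else 0))).sum := by
            exact congrArg List.sum (List.map_congr_left (fun u _ => hsplit u))
        _ = ((vs.filter p).map (fun u => (l.count u : Int))).sum
              + ((vs.filter p).map (fun u => if x = u then (1 : Int) else 0)).sum := by
            exact List.sum_map_add
        _ = (l.countP p : Int) + (if p x then 1 else 0) := by
            rw [ih vs hnd hml, pv_indicator p x vs hnd hx]
        _ = ((x :: l).countP p : Int) := by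
            by_cases h : p x = true <;> simp [h]

-- both ports equal the same count formula entrywise; chain them
theorem pv_B_entry (score : List Int) (s : Int) (hs : s ∈ score) :
    (pvGeMap score).getD s 0 = (score.countP (fun x => decide (s ≤ x)) : Int) := by
  unfold pvGeMap
  simp only [PySem.Dict.foldl_insert_getD_add_one_eq_counter]
  set vs := PySem.List.sorted (PySem.Dict.counter score).keys (fun x => x) true with hvs
  have hperm : vs.Perm (PySem.Set.ofList score) := by
    rw [hvs, PySem.Dict.keys_counter]
    exact PySem.List.sorted_perm _ _ _
  have hnd : vs.Nodup := hperm.nodup_iff.mpr (PySem.Set.nodup_ofList score)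
  have hsv : s ∈ vs := hperm.mem_iff.mpr ((PySem.Set.mem_ofList _ _).mpr hs)
  have hpw : vs.Pairwise (fun a b => b < a) := by
    have h1 : vs.Pairwise (fun a b => b ≤ a) := by
      rw [hvs]; exact PySem.List.sorted_pairwise_rev _ _
    exact (h1.and hnd).imp (fun h => lt_of_le_of_ne h.1 (Ne.symm h.2))
  rw [pv_suffix _ vs 0 _ s hpw hsv, zero_add]
  have hcnt : ∀ u ∈ vs.filter (fun u => decide (s ≤ u)),
      (PySem.Dict.counter score).getD u 0 = (score.count u : Int) := by
    intro u _; exact_mod_cast PySem.Dict.getD_counter score u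
  rw [List.map_congr_left hcnt]
  have hfperm : (vs.filter (fun u => decide (s ≤ u))).Perm
      ((PySem.Set.ofList score).filter (fun u => decide (s ≤ u))) := hperm.filter _
  rw [(hfperm.map _).sum_eq]
  exact pv_count_sum _ score (PySem.Set.ofList score) (PySem.Set.nodup_ofList score)
    (fun x hx => (PySem.Set.mem_ofList _ _).mpr hx)

-- ===== VERDICT (by name: the statement is the Claim_ definition above) =====
theorem find_ranks_spec : Claim_equal_find_ranks := by
  intro score _
  unfold Spec_find_ranks find_ranks find_ranks_alt
  simp only [funext (fun d => funext (pv_body_eq d))]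
  apply List.map_congr_left
  intro s hs
  have hperm := PySem.List.sorted_perm score (fun x => x) true
  rw [pv_lookup _ 0 _ s (PySem.List.sorted_pairwise_rev score (fun x => x))
        ((PySem.List.mem_sorted _ _ _ _).mpr hs),
      hperm.countP_eq, pv_B_entry score s hs]
  congr 1; ring
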